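-- pv_equiv track=rewrite | github.com/evennia/evennia | evennia/contrib/utils/tree_select/tree_select.py | dashcount
-- ===== SOURCE A (Python) =====
-- def dashcount(entry):
--     """
--     Counts the number of dashes at the beginning of a string. This
--     is needed to determine the depth of options in categories.
--
--     Args:
--         entry (str): String to count the dashes at the start of
--
--     Returns:
--         dashes (int): Number of dashes at the start
--     """
--     dashes = 0
--     for char in entry:
--         if char == "-":
--             dashes += 1
--         else:
--             return dashes
--     return dashes
-- ===== SOURCE B (Python) =====
-- def dashcount(entry):
--     # closed form: leading dashes = total length minus length after lstrip("-")
--     return len(entry) - len(entry.lstrip("-"))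
-- ===== Notes on version B (the rewrite author's own statement) =====
-- stated objective: idiomatic
-- what changed: Replaces the explicit character loop with an early-return counter by a closed-form length difference: len(entry) - the length after stripping leading dashes with lstrip.
import Mathlib
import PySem

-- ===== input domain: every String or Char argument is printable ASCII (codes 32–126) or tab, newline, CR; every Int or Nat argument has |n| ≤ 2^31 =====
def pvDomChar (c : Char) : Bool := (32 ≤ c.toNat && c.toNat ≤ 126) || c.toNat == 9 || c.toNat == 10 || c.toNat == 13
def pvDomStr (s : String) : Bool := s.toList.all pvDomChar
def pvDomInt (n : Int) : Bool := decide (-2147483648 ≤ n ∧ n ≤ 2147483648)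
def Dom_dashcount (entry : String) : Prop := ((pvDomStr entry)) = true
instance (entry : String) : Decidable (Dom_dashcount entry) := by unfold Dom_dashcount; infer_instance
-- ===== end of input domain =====

-- B replaces A's explicit counting loop with the closed form len(entry) - len(entry.lstrip("-")) (idiomatic; same O(n) cost).


-- ===== PORT A =====
-- the 'for char in entry' loop with early return, as structural recursion over the characters
def dashcountLoop (cs : List Char) (dashes : Int) : Int :=
  match cs with
  | [] => dashes
  | c :: rest => if c = '-' then dashcountLoop rest (dashes + 1) else dashes

def dashcount (entry : String) : Int :=
  dashcountLoop entry.toList 0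

-- ===== PORT B =====
-- Python's entry.lstrip("-") (single strip char) is exactly dropWhile (· = '-') on the characters
def dashcount_alt (entry : String) : Int :=
  (entry.toList.length : Int) - ((entry.toList.dropWhile (· == '-')).length : Int)

-- ===== PRECONDITION & SPEC =====
def Spec_dashcount (entry : String) (out : Int) : Prop := out = dashcount_alt entry
instance (entry : String) (out : Int) : Decidable (Spec_dashcount entry out) := by unfold Spec_dashcount; infer_instance

-- ===== CLAIM (what is proved, stated in full; the proofs are below) =====
def Claim_equal_dashcount : Prop := ∀ (entry : String), Dom_dashcount entry → Spec_dashcount entry (dashcount entry)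

-- ===== LEMMAS AND PROOFS =====
theorem dashcountLoop_eq (cs : List Char) (d : Int) :
    dashcountLoop cs d = d + ((cs.length : Int) - ((cs.dropWhile (· == '-')).length : Int)) := by
  induction cs generalizing d with
  | nil => simp [dashcountLoop]
  | cons c rest ih =>
    simp only [dashcountLoop, List.dropWhile]
    by_cases h : c = '-'
    · simp [h, ih]; push_cast; ring
    · have : (c == '-') = false := by simp [h]
      have hle : ((rest.dropWhile (· == '-')).length : Int) ≤ (rest.length : Int) := by
        exact_mod_cast List.length_dropWhile_le _ _
      simp only [this, if_neg h, List.length_cons]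
      omega

-- ===== VERDICT (by name: the statement is the Claim_ definition above) =====
theorem dashcount_spec : Claim_equal_dashcount := by
  intro entry _
  unfold Spec_dashcount dashcount dashcount_alt
  rw [dashcountLoop_eq]
  ring
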